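-- pv_equiv track=rewrite | github.com/ildarius116/Yandex_Contest | 20xx_a_andrey_and_acid_OK.py | foo
-- ===== SOURCE A (Python) =====
-- def foo(arr):
--     a_max = max(arr)
--     if a_max != arr[-1]:
--         return -1
--     prev = 0
--     a_min = a_max
--     for ai in arr:
--         if ai < prev:
--             return -1
--         prev = ai
--         if ai < a_min:
--             a_min = ai
--     return a_max - a_min
-- ===== SOURCE B (Python) =====
-- def foo(arr):
--     if arr != sorted(arr):
--         return -1
--     return arr[-1] - arr[0]
-- ===== Notes on version B (the rewrite author's own statement) =====
-- stated objective: simpler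
-- what changed: Replaces the streaming scan tracking prev and a running min with a sort-and-compare validation and a direct endpoint subtraction arr[-1] - arr[0].
-- intended difference: On non-empty non-decreasing arrays whose first element is negative, A returns -1 (its prev variable starts at 0, so a negative head is misread as a descent) while B returns arr[-1] - arr[0], the intended max-minus-min of a valid array. — e.g. on foo([-2, -1]): A returns -1, B returns 1
import Mathlib
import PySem

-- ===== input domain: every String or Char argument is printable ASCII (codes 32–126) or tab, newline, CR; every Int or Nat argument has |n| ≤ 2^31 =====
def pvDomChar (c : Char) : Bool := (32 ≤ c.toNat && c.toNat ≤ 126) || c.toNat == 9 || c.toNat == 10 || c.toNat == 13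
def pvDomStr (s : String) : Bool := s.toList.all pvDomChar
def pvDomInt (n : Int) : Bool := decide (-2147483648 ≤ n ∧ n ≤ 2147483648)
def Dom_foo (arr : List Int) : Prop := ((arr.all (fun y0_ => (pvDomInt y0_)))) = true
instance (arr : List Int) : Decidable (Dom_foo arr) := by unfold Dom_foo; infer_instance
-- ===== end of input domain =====

-- B validates by comparing with a sorted copy and subtracts the endpoints, instead of A's
-- streaming scan tracking prev and a running min (objective: simpler); on sorted arrays with a
-- negative head A's prev=0 start wrongly yields -1, stated as the intended difference D_foo.

-- ===== PORT A =====
def fooLoop (aMax : Int) : List Int → Int → Int → Int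
  | [], _, aMin => aMax - aMin
  | ai :: rest, prev, aMin =>
    if ai < prev then -1
    else fooLoop aMax rest ai (if ai < aMin then ai else aMin)

def foo (arr : List Int) : Int :=
  match PySem.List.max? arr (fun x => x) with
  | none => 0      -- max([]) raises ValueError; outside Pre_foo
  | some aMax =>
    match PySem.List.pyGet? arr (-1) with
    | none => 0    -- unreachable for nonempty arr
    | some last =>
      if aMax ≠ last then -1
      else fooLoop aMax arr 0 aMax

-- ===== PORT B =====
def foo_alt (arr : List Int) : Int :=
  if arr ≠ PySem.List.sorted arr (fun x => x) false then -1
  else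
    match PySem.List.pyGet? arr (-1), PySem.List.pyGet? arr 0 with
    | some last, some first => last - first
    | _, _ => 0    -- arr[-1] on [] raises IndexError; outside Pre_foo

-- ===== PRECONDITION & SPEC =====
-- Both A (max([]) raises ValueError) and B (arr[-1] raises IndexError) raise on the empty list.
def Pre_foo (arr : List Int) : Prop := arr ≠ []
instance (arr : List Int) : Decidable (Pre_foo arr) := by unfold Pre_foo; infer_instance
def pvWitness_foo : List Int := [1, 2, 3]

-- On non-empty non-decreasing arrays whose first element is negative, A returns -1 (its prev
-- variable starts at 0, so a negative head is misread as a descent) while B returns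
-- arr[-1] - arr[0], the intended max-minus-min of a valid array.
def D_foo (arr : List Int) : Prop :=
  arr ≠ [] ∧ arr.Pairwise (· ≤ ·) ∧ arr.headI < 0
instance (arr : List Int) : Decidable (D_foo arr) := by unfold D_foo; infer_instance

def Spec_foo (arr : List Int) (out : Int) : Prop := ¬ D_foo arr → out = foo_alt arr
instance (arr : List Int) (out : Int) : Decidable (Spec_foo arr out) := by unfold Spec_foo; infer_instance

def pvDiffWitness_foo : List Int := [-2, -1]
def pvDiffWitnessOut_foo : Int × Int := (-1, 1)

-- ===== CLAIM (what is proved, stated in full; the proofs are below) =====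
def Claim_unchanged_foo : Prop := ∀ (arr : List Int), Dom_foo arr → Pre_foo arr → Spec_foo arr (foo arr)
def Claim_changed_foo : Prop := Dom_foo (pvDiffWitness_foo) ∧ Pre_foo (pvDiffWitness_foo) ∧ D_foo (pvDiffWitness_foo) ∧ foo (pvDiffWitness_foo) = pvDiffWitnessOut_foo.1 ∧ foo_alt (pvDiffWitness_foo) = pvDiffWitnessOut_foo.2 ∧ pvDiffWitnessOut_foo.1 ≠ pvDiffWitnessOut_foo.2
def Claim_exact_foo : Prop := ∀ (arr : List Int), Dom_foo arr → Pre_foo arr → D_foo arr → foo arr ≠ foo_alt arr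

-- ===== LEMMAS AND PROOFS =====

theorem pairwise_le_cons_cons (a b : Int) (l : List Int) :
    (a :: b :: l).Pairwise (· ≤ ·) ↔ a ≤ b ∧ (b :: l).Pairwise (· ≤ ·) := by
  constructor
  · intro h
    rcases List.pairwise_cons.mp h with ⟨h1, h2⟩
    exact ⟨h1 b (by simp), h2⟩
  · rintro ⟨hab, h⟩
    refine List.pairwise_cons.mpr ⟨?_, h⟩
    intro y hy
    rcases List.mem_cons.mp hy with rfl | hy
    · exact hab
    · exact le_trans hab (List.rel_of_pairwise_cons h hy)

-- A's loop computes aMax - (running min) when prev :: xs is non-decreasing, else -1.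
theorem fooLoop_eq (aMax : Int) (xs : List Int) : ∀ (prev aMin : Int),
    fooLoop aMax xs prev aMin =
      if (prev :: xs).Pairwise (· ≤ ·) then aMax - xs.foldl min aMin else -1 := by
  induction xs with
  | nil => intro prev aMin; simp [fooLoop]
  | cons ai rest ih =>
    intro prev aMin
    by_cases h : ai < prev
    · rw [fooLoop, if_pos h, if_neg]
      intro hp
      have := (pairwise_le_cons_cons prev ai rest).mp hp
      omega
    · have hle : prev ≤ ai := by omega
      rw [fooLoop, if_neg h, ih]
      have hmin : (if ai < aMin then ai else aMin) = min aMin ai := by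
        by_cases hc : ai < aMin <;> simp [hc] <;> omega
      rw [hmin]
      by_cases hp : (ai :: rest).Pairwise (· ≤ ·)
      · rw [if_pos hp, if_pos ((pairwise_le_cons_cons prev ai rest).mpr ⟨hle, hp⟩)]
        simp
      · rw [if_neg hp, if_neg]
        intro hpp
        exact hp ((pairwise_le_cons_cons prev ai rest).mp hpp).2

theorem foldl_min_of_le (l : List Int) : ∀ (a : Int), (∀ y ∈ l, a ≤ y) → l.foldl min a = a := by
  induction l with
  | nil => intro a _; rfl
  | cons x t ih =>
    intro a h
    have hx : a ≤ x := h x (by simp)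
    simp only [List.foldl_cons]
    have : min a x = a := by omega
    rw [this]
    exact ih a (fun y hy => h y (by simp [hy]))

theorem pairwise_iff_eq_sorted (arr : List Int) :
    arr = PySem.List.sorted arr (fun x => x) false ↔ arr.Pairwise (· ≤ ·) := by
  constructor
  · intro h
    have := PySem.List.sorted_pairwise arr (fun x => x)
    rw [← h] at this
    simpa using this
  · intro h
    exact (PySem.List.sorted_eq_self_of_pairwise arr (fun x => x) (by simpa using h)).symm

-- In a non-decreasing non-empty list every element is ≤ the last.
theorem pairwise_le_getLast (x : Int) (t : List Int) :
    (x :: t).Pairwise (· ≤ ·) →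
      ∀ y ∈ x :: t, y ≤ (x :: t).getLast (List.cons_ne_nil x t) := by
  induction t generalizing x with
  | nil =>
    intro _ y hy
    simp at hy
    simp [hy]
  | cons b t ih =>
    intro hp y hy
    rcases (pairwise_le_cons_cons x b t).mp hp with ⟨hxb, hp'⟩
    have hlast : (x :: b :: t).getLast (List.cons_ne_nil x (b :: t)) =
        (b :: t).getLast (List.cons_ne_nil b t) := by
      simp [List.getLast_cons]
    rw [hlast]
    rcases List.mem_cons.mp hy with rfl | hy'
    · exact le_trans hxb (ih b hp' b (by simp))
    · exact ih b hp' y hy'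

-- For a non-decreasing non-empty list, the running max equals the last element.
theorem foldl_max_eq_getLast (x : Int) (t : List Int) (hp : (x :: t).Pairwise (· ≤ ·)) :
    t.foldl max x = (x :: t).getLast (List.cons_ne_nil x t) := by
  have hm : PySem.List.max? (x :: t) (fun y => y) = some (t.foldl max x) :=
    PySem.List.max?_id_cons x t
  have hmem : t.foldl max x ∈ x :: t := PySem.List.max?_mem hm
  have h1 : t.foldl max x ≤ (x :: t).getLast (List.cons_ne_nil x t) :=
    pairwise_le_getLast x t hp _ hmem
  have h2 : (x :: t).getLast (List.cons_ne_nil x t) ≤ t.foldl max x := by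
    have := PySem.List.max?_isMax hm ((x :: t).getLast (List.cons_ne_nil x t))
      (List.getLast_mem _)
    simpa using this
  omega

-- ===== VERDICT (by name: the statements are the Claim_ definitions above) =====
-- evaluation lemmas for the ports on a cons cell
theorem foo_cons (x : Int) (t : List Int) :
    foo (x :: t) =
      if t.foldl max x ≠ (x :: t).getLast (List.cons_ne_nil x t) then -1
      else fooLoop (t.foldl max x) (x :: t) 0 (t.foldl max x) := by
  unfold foo
  rw [PySem.List.max?_id_cons, PySem.List.pyGet?_neg_one,
    List.getLast?_eq_some_getLast (h := List.cons_ne_nil x t)]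

theorem foo_alt_cons (x : Int) (t : List Int) :
    foo_alt (x :: t) =
      if (x :: t) ≠ PySem.List.sorted (x :: t) (fun y => y) false then -1
      else (x :: t).getLast (List.cons_ne_nil x t) - x := by
  unfold foo_alt
  rw [PySem.List.pyGet?_neg_one, List.getLast?_eq_some_getLast (h := List.cons_ne_nil x t),
    PySem.List.pyGet?_zero_cons]

theorem foo_spec : Claim_unchanged_foo := by
  intro arr _ hpre hnd
  match arr with
  | [] => exact absurd rfl hpre
  | x :: t =>
    rw [foo_cons, foo_alt_cons]
    by_cases hsorted : (x :: t).Pairwise (· ≤ ·)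
    · -- sorted; since ¬ D_foo, the head is non-negative
      have hx0 : 0 ≤ x := by
        by_contra hneg
        exact hnd ⟨List.cons_ne_nil x t, hsorted, by simp; omega⟩
      have hmeq : t.foldl max x = (x :: t).getLast (List.cons_ne_nil x t) :=
        foldl_max_eq_getLast x t hsorted
      have hs : (x :: t) = PySem.List.sorted (x :: t) (fun x => x) false :=
        (pairwise_iff_eq_sorted (x :: t)).mpr hsorted
      rw [if_neg (by rw [hmeq]; simp), if_neg (by simp [← hs])]
      rw [fooLoop_eq]
      have hp : (0 :: x :: t).Pairwise (· ≤ ·) :=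
        (pairwise_le_cons_cons 0 x t).mpr ⟨hx0, hsorted⟩
      rw [if_pos hp]
      have hmin : (x :: t).foldl min (t.foldl max x) = x := by
        simp only [List.foldl_cons]
        have hxm : x ≤ t.foldl max x := by
          rw [hmeq]; exact pairwise_le_getLast x t hsorted x (by simp)
        have h1 : min (t.foldl max x) x = x := by omega
        rw [h1]
        exact foldl_min_of_le t x (fun y hy => List.rel_of_pairwise_cons hsorted hy)
      rw [hmin, hmeq]
    · -- not non-decreasing: both return -1
      have hne : (x :: t) ≠ PySem.List.sorted (x :: t) (fun x => x) false := by
        intro h; exact hsorted ((pairwise_iff_eq_sorted _).mp h)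
      rw [if_pos hne]
      by_cases hml : t.foldl max x ≠ (x :: t).getLast (List.cons_ne_nil x t)
      · rw [if_pos hml]
      · rw [if_neg hml, fooLoop_eq, if_neg]
        intro hp
        exact hsorted ((pairwise_le_cons_cons 0 x t).mp hp).2

theorem foo_changed : Claim_changed_foo := by unfold Claim_changed_foo; decide

theorem foo_tight : Claim_exact_foo := by
  intro arr _ _ hd
  rcases hd with ⟨hne, hsorted, hneg⟩
  match arr with
  | [] => exact absurd rfl hne
  | x :: t =>
    have hx : x < 0 := by simpa using hneg
    have hs : (x :: t) = PySem.List.sorted (x :: t) (fun x => x) false :=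
      (pairwise_iff_eq_sorted (x :: t)).mpr hsorted
    -- A returns -1
    have hA : foo (x :: t) = -1 := by
      rw [foo_cons]
      have hmeq : t.foldl max x = (x :: t).getLast (List.cons_ne_nil x t) :=
        foldl_max_eq_getLast x t hsorted
      rw [if_neg (by rw [hmeq]; simp), fooLoop_eq, if_neg]
      intro hp
      have := (pairwise_le_cons_cons 0 x t).mp hp
      omega
    -- B returns last - x ≥ 0
    have hB : foo_alt (x :: t) = (x :: t).getLast (List.cons_ne_nil x t) - x := by
      rw [foo_alt_cons, if_neg (by simp [← hs])]
    have hge : x ≤ (x :: t).getLast (List.cons_ne_nil x t) :=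
      pairwise_le_getLast x t hsorted x (by simp)
    rw [hA, hB]
    omega
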